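-- pv_equiv track=rewrite | github.com/SINHOLEE/Algorithm | python/beckjun/6988 타일밟기.py | soulve
-- ===== SOURCE A (Python) =====
-- def soulve(xx, yy):
--     x = 1
--     y = 1
--     result = 1
--     while True:
--         if xx == x and yy == y:
--             break
--
--         result += 1
--         y += 1
--         if xx == x and yy == y:
--             break
--         check = False
--         count = 0
--         for i in range(y - 1):
--             x += 1
--             y -= 1
--             result += 1
--             count += 1
--             if xx == x and yy == y:
--                 check = True
--                 break
--         if check:
--             break
--         else:
--             for j in range(count):
--                 x -= 1
--                 y += 1
--
--     return result
-- ===== SOURCE B (Python) =====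
-- def soulve(xx, yy):
--     s = xx + yy
--     return (s - 1) * (s - 2) // 2 + xx
-- ===== Notes on version B (the rewrite author's own statement) =====
-- stated objective: faster
-- what changed: Replaces the cell-by-cell simulation of the diagonal traversal with the closed-form triangular-number formula (s-1)(s-2)//2 + xx for s = xx+yy.
import Mathlib
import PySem

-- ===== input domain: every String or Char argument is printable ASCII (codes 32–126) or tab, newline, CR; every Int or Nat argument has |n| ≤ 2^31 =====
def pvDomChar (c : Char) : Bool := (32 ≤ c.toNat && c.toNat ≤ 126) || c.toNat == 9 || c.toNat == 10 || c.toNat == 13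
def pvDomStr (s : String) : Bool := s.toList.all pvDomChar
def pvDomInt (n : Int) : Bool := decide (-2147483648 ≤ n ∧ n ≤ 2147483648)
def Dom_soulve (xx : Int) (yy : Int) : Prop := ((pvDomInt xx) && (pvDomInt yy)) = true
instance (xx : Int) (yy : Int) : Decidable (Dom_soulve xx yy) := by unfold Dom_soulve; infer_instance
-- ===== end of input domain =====

-- B replaces A's cell-by-cell diagonal walk with the closed-form triangular-number formula (O(1) vs O((xx+yy)^2)).

-- ===== PORT A =====
-- inner 'for i in range(y-1)' loop: returns (check, x, y, result, count)
def soulveInner (xx yy : Int) : Nat → Int → Int → Int → Int → (Bool × Int × Int × Int × Int)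
  | 0, x, y, result, count => (false, x, y, result, count)
  | n+1, x, y, result, count =>
    let x := x + 1
    let y := y - 1
    let result := result + 1
    let count := count + 1
    if xx = x ∧ yy = y then (true, x, y, result, count)
    else soulveInner xx yy n x y result count

-- the 'for j in range(count)' revert loop
def soulveRevert : Nat → Int → Int → Int × Int
  | 0, x, y => (x, y)
  | n+1, x, y => soulveRevert n (x - 1) (y + 1)

-- the 'while True' loop; fuel only makes it total (A diverges outside Pre_)
def soulveLoop (xx yy : Int) : Nat → Int → Int → Int → Int
  | 0, _, _, result => result
  | fuel+1, x, y, result =>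
    if xx = x ∧ yy = y then result
    else
      let result := result + 1
      let y := y + 1
      if xx = x ∧ yy = y then result
      else
        let t := soulveInner xx yy (y - 1).toNat x y result 0
        if t.1 then t.2.2.2.1
        else
          let p := soulveRevert t.2.2.2.2.toNat t.2.1 t.2.2.1
          soulveLoop xx yy fuel p.1 p.2 t.2.2.2.1

def soulve (xx : Int) (yy : Int) : Int := soulveLoop xx yy (xx + yy).toNat 1 1 1

-- ===== PORT B =====
def soulve_alt (xx : Int) (yy : Int) : Int :=
  PySem.Int.floordiv ((xx + yy - 1) * (xx + yy - 2)) 2 + xx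

-- ===== PRECONDITION & SPEC =====
-- Pre_ excludes exactly the inputs with xx < 1 or yy < 1, on which A's while-loop never terminates (A returns no value there).
def Pre_soulve (xx : Int) (yy : Int) : Prop := 1 ≤ xx ∧ 1 ≤ yy
instance (xx : Int) (yy : Int) : Decidable (Pre_soulve xx yy) := by unfold Pre_soulve; infer_instance
def pvWitness_soulve : Int × Int := (3, 4)

def Spec_soulve (xx : Int) (yy : Int) (out : Int) : Prop := out = soulve_alt xx yy
instance (xx : Int) (yy : Int) (out : Int) : Decidable (Spec_soulve xx yy out) := by unfold Spec_soulve; infer_instance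

-- ===== CLAIM (what is proved, stated in full; the proofs are below) =====
def Claim_equal_soulve : Prop := ∀ (xx : Int) (yy : Int), Dom_soulve xx yy → Pre_soulve xx yy → Spec_soulve xx yy (soulve xx yy)

-- ===== LEMMAS AND PROOFS =====

lemma soulveInner_spec (xx yy : Int) : ∀ (n : Nat) (x y r c : Int),
    soulveInner xx yy n x y r c =
      if 0 ≤ xx - x - 1 ∧ xx - x - 1 < (n : Int) ∧ yy = y - (xx - x) then
        (true, xx, yy, r + (xx - x), c + (xx - x))
      else (false, x + n, y - n, r + n, c + n) := by
  intro n
  induction n with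
  | zero =>
    intro x y r c
    rw [if_neg (by push_cast; omega)]
    simp [soulveInner]
  | succ n ih =>
    intro x y r c
    rw [soulveInner]
    by_cases h : xx = x + 1 ∧ yy = y - 1
    · rw [if_pos h, if_pos (by push_cast; omega)]
      simp only [Prod.mk.injEq]
      refine ⟨trivial, by omega, by omega, by omega, by omega⟩
    · rw [if_neg h, ih]
      by_cases h2 : 0 ≤ xx - (x + 1) - 1 ∧ xx - (x + 1) - 1 < (n : Int) ∧ yy = y - 1 - (xx - (x + 1))
      · rw [if_pos h2, if_pos (by push_cast at h2 ⊢; omega)]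
        simp only [Prod.mk.injEq]
        refine ⟨trivial, trivial, trivial, by omega, by omega⟩
      · rw [if_neg h2, if_neg (by push_cast at h2 ⊢; omega)]
        simp only [Prod.mk.injEq]
        refine ⟨trivial, by push_cast; ring, by push_cast; ring, by push_cast; ring, by push_cast; ring⟩

lemma soulveRevert_spec : ∀ (n : Nat) (x y : Int),
    soulveRevert n x y = (x - n, y + n) := by
  intro n
  induction n with
  | zero => intro x y; simp [soulveRevert]
  | succ n ih =>
    intro x y
    rw [soulveRevert, ih]
    simp only [Prod.mk.injEq]
    constructor <;> push_cast <;> ring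

lemma soulve_alt_char (xx yy : Int) :
    2 * soulve_alt xx yy = (xx + yy - 1) * (xx + yy - 2) + 2 * xx := by
  obtain ⟨t, ht⟩ := Int.even_mul_succ_self (xx + yy - 2)
  have hm : (xx + yy - 1) * (xx + yy - 2) = t + t := by
    rw [← ht]; ring
  unfold soulve_alt
  have hq : PySem.Int.floordiv ((xx + yy - 1) * (xx + yy - 2)) 2 = t := by
    rw [PySem.Int.floordiv_eq_iff_of_pos (by norm_num)]
    omega
  rw [hq]; omega

lemma soulveLoop_spec (xx yy : Int) (hx : 1 ≤ xx) (hy : 1 ≤ yy) :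
    ∀ (fuel : Nat) (d r : Int), 1 ≤ d → 2 * r = d * (d + 1) →
    (d + 2 ≤ xx + yy ∨ (xx = 1 ∧ yy = 1 ∧ d = 1)) →
    xx + yy ≤ d + fuel →
    soulveLoop xx yy fuel 1 d r = soulve_alt xx yy := by
  intro fuel
  induction fuel with
  | zero => intro d r hd hr hH hf; omega
  | succ fuel ih =>
    intro d r hd hr hH hf
    have halt := soulve_alt_char xx yy
    rw [soulveLoop]
    by_cases h1 : xx = 1 ∧ yy = d
    · rw [if_pos h1]
      have hd1 : d = 1 := by omega
      subst hd1
      have : (xx + yy - 1) * (xx + yy - 2) = 0 := by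
        rw [h1.1, h1.2]; ring
      omega
    · rw [if_neg h1]
      by_cases h2 : xx = 1 ∧ yy = d + 1
      · rw [if_pos h2]
        have hs : (xx + yy - 1) * (xx + yy - 2) = d * (d + 1) := by
          rw [h2.1, h2.2]; ring
        omega
      · rw [if_neg h2]
        rw [soulveInner_spec]
        have hn : ((d + 1 - 1).toNat : Int) = d := by omega
        by_cases h3 : 0 ≤ xx - 1 - 1 ∧ xx - 1 - 1 < ((d + 1 - 1).toNat : Int) ∧ yy = d + 1 - (xx - 1)
        · rw [if_pos h3]
          dsimp only
          rw [if_pos rfl]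
          have hs : (xx + yy - 1) * (xx + yy - 2) = (d + 1) * d := by
            have : xx + yy = d + 2 := by omega
            rw [this]; ring
          have : (d + 1) * d = d * (d + 1) := by ring
          omega
        · rw [if_neg h3]
          dsimp only
          rw [if_neg Bool.false_ne_true, soulveRevert_spec]
          dsimp only
          -- state after the full inner pass and revert
          have hcnt : (((0 : Int) + ((d + 1 - 1).toNat : Int)).toNat : Int) = d := by omega
          have hx1 : (1 : Int) + ((d + 1 - 1).toNat : Int) - (((0 : Int) + ((d + 1 - 1).toNat : Int)).toNat : Int) = 1 := by omega
          have hy1 : d + 1 - ((d + 1 - 1).toNat : Int) + (((0 : Int) + ((d + 1 - 1).toNat : Int)).toNat : Int) = d + 1 := by omega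
          rw [hx1, hy1]
          have hbig : d + 3 ≤ xx + yy := by
            rcases hH with h | h
            · rcases lt_or_ge (xx + yy) (d + 3) with hlt | hge
              · exfalso
                have hsum : xx + yy = d + 2 := by omega
                exact h3 ⟨by omega, by omega, by omega⟩
              · exact hge
            · exfalso; exact h1 ⟨h.1, by omega⟩
          have hr' : 2 * (r + 1 + ((d + 1 - 1).toNat : Int)) = (d + 1) * (d + 1 + 1) := by
            have : (d + 1) * (d + 1 + 1) = d * (d + 1) + 2 * d + 2 := by ring
            omega
          exact ih (d + 1) (r + 1 + ((d + 1 - 1).toNat : Int)) (by omega) hr' (Or.inl (by omega)) (by omega)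

-- ===== VERDICT (by name: the statement is the Claim_ definition above) =====
theorem soulve_spec : Claim_equal_soulve := by
  intro xx yy _ hpre
  obtain ⟨hx, hy⟩ := hpre
  unfold Spec_soulve soulve
  exact (soulveLoop_spec xx yy hx hy (xx + yy).toNat 1 1 (by omega) (by ring)
    (by omega) (by omega))
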